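-- pv_equiv track=rewrite | github.com/FacundoNu/chase-py | chase.py | reconocer_movimientos_robots
-- ===== SOURCE A (Python) =====
-- ARRIBA = (0, 1)
--
-- ABAJO = (0, -1)
--
-- DERECHA = (1, 0)
--
-- IZQUIERDA = (-1, 0)
--
-- ARRIBA_DERECHA = (1, 1)
--
-- ARRIBA_IZQUIERDA = (-1, 1)
--
-- ABAJO_DERECHA = (1, -1)
--
-- ABAJO_IZQUIERDA = (-1, -1)
--
-- def reconocer_movimientos_robots(jugador, robots):
--     objetivo_x, objetivo_y = jugador
--     movimientos = []
--     for posicion_x, posicion_y in robots: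
--         if posicion_x < objetivo_x and posicion_y < objetivo_y:
--             movimientos.append(ARRIBA_DERECHA)
--         elif posicion_x > objetivo_x and posicion_y < objetivo_y:
--             movimientos.append(ARRIBA_IZQUIERDA)
--         elif posicion_x < objetivo_x and posicion_y > objetivo_y:
--             movimientos.append(ABAJO_DERECHA)
--         elif posicion_x > objetivo_x and posicion_y > objetivo_y:
--             movimientos.append(ABAJO_IZQUIERDA)
--         elif posicion_x < objetivo_x:
--             movimientos.append(DERECHA)
--         elif posicion_x > objetivo_x:
--             movimientos.append(IZQUIERDA)
--         elif posicion_y < objetivo_y: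
--             movimientos.append(ARRIBA)
--         elif posicion_y > objetivo_y:
--             movimientos.append(ABAJO)
--     return movimientos
-- ===== SOURCE B (Python) =====
-- _TABLA = {
--     (-1, -1): (1, 1),
--     (1, -1): (-1, 1),
--     (-1, 1): (1, -1),
--     (1, 1): (-1, -1),
--     (-1, 0): (1, 0),
--     (1, 0): (-1, 0),
--     (0, -1): (0, 1),
--     (0, 1): (0, -1),
-- }
--
-- def reconocer_movimientos_robots(jugador, robots):
--     ox, oy = jugador
--
--     def go(i):
--         if i == len(robots):
--             return []
--         x, y = robots[i]
--         mov = _TABLA.get(((x > ox) - (x < ox), (y > oy) - (y < oy)))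
--         rest = go(i + 1)
--         return [mov] + rest if mov is not None else rest
--
--     return go(0)
-- ===== Notes on version B (the rewrite author's own statement) =====
-- stated objective: alternative
-- what changed: Replaces the loop with an eight-branch elif cascade and append-accumulator by structural recursion that conses results front-to-back and classifies each robot with a single precomputed lookup table keyed by the comparison-sign pair (robots at the player have no table entry and are skipped).
import Mathlib
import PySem

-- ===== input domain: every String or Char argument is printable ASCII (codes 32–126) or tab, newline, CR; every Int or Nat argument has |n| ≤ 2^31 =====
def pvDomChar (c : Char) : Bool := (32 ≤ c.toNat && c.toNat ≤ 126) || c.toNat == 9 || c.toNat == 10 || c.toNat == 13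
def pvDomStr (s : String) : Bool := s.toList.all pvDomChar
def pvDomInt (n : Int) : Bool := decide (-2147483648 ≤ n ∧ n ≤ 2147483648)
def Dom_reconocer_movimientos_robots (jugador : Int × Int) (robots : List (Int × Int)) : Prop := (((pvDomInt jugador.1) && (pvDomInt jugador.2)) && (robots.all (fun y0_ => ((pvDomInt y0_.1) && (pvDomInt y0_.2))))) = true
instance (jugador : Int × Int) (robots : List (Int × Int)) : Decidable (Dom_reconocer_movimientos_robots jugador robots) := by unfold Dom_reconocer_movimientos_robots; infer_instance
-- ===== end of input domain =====

-- ===== PORT A =====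
-- B replaces the elif cascade + append loop by structural recursion with a lookup table (objective: alternative); return value only.
def ARRIBA : Int × Int := (0, 1)
def ABAJO : Int × Int := (0, -1)
def DERECHA : Int × Int := (1, 0)
def IZQUIERDA : Int × Int := (-1, 0)
def ARRIBA_DERECHA : Int × Int := (1, 1)
def ARRIBA_IZQUIERDA : Int × Int := (-1, 1)
def ABAJO_DERECHA : Int × Int := (1, -1)
def ABAJO_IZQUIERDA : Int × Int := (-1, -1)

def reconocer_movimientos_robots (jugador : Int × Int) (robots : List (Int × Int)) : List (Int × Int) :=
  let objetivo_x := jugador.1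
  let objetivo_y := jugador.2
  robots.foldl (fun movimientos r =>
    let posicion_x := r.1
    let posicion_y := r.2
    if posicion_x < objetivo_x ∧ posicion_y < objetivo_y then movimientos ++ [ARRIBA_DERECHA]
    else if posicion_x > objetivo_x ∧ posicion_y < objetivo_y then movimientos ++ [ARRIBA_IZQUIERDA]
    else if posicion_x < objetivo_x ∧ posicion_y > objetivo_y then movimientos ++ [ABAJO_DERECHA]
    else if posicion_x > objetivo_x ∧ posicion_y > objetivo_y then movimientos ++ [ABAJO_IZQUIERDA]
    else if posicion_x < objetivo_x then movimientos ++ [DERECHA]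
    else if posicion_x > objetivo_x then movimientos ++ [IZQUIERDA]
    else if posicion_y < objetivo_y then movimientos ++ [ARRIBA]
    else if posicion_y > objetivo_y then movimientos ++ [ABAJO]
    else movimientos) []

-- ===== PORT B =====
-- the module-level lookup table _TABLA of Source B
def pvTabla : PySem.Dict (Int × Int) (Int × Int) :=
  PySem.Dict.ofList [((-1, -1), (1, 1)), ((1, -1), (-1, 1)), ((-1, 1), (1, -1)),
    ((1, 1), (-1, -1)), ((-1, 0), (1, 0)), ((1, 0), (-1, 0)), ((0, -1), (0, 1)), ((0, 1), (0, -1))]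

-- the inner recursive go of Source B (its index walk = structural recursion on the robot list)
def pvGo (ox oy : Int) : List (Int × Int) → List (Int × Int)
  | [] => []
  | (x, y) :: rest =>
    match pvTabla.get? ((if x > ox then 1 else 0) - (if x < ox then 1 else 0),
                        (if y > oy then 1 else 0) - (if y < oy then 1 else 0)) with
    | some mov => mov :: pvGo ox oy rest
    | none => pvGo ox oy rest

def reconocer_movimientos_robots_alt (jugador : Int × Int) (robots : List (Int × Int)) : List (Int × Int) :=
  pvGo jugador.1 jugador.2 robots

-- ===== PRECONDITION & SPEC =====
def Spec_reconocer_movimientos_robots (jugador : Int × Int) (robots : List (Int × Int)) (out : List (Int × Int)) : Prop := out = reconocer_movimientos_robots_alt jugador robots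
instance (jugador : Int × Int) (robots : List (Int × Int)) (out : List (Int × Int)) : Decidable (Spec_reconocer_movimientos_robots jugador robots out) := by unfold Spec_reconocer_movimientos_robots; infer_instance

-- ===== CLAIM =====
def Claim_equal_reconocer_movimientos_robots : Prop := ∀ (jugador : Int × Int) (robots : List (Int × Int)), Dom_reconocer_movimientos_robots jugador robots → Spec_reconocer_movimientos_robots jugador robots (reconocer_movimientos_robots jugador robots)

-- ===== LEMMAS AND PROOFS =====
theorem pv_foldl_suffix (ox oy : Int) (robots : List (Int × Int)) (acc : List (Int × Int)) :
    robots.foldl (fun movimientos r =>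
      let posicion_x := r.1
      let posicion_y := r.2
      if posicion_x < ox ∧ posicion_y < oy then movimientos ++ [ARRIBA_DERECHA]
      else if posicion_x > ox ∧ posicion_y < oy then movimientos ++ [ARRIBA_IZQUIERDA]
      else if posicion_x < ox ∧ posicion_y > oy then movimientos ++ [ABAJO_DERECHA]
      else if posicion_x > ox ∧ posicion_y > oy then movimientos ++ [ABAJO_IZQUIERDA]
      else if posicion_x < ox then movimientos ++ [DERECHA]
      else if posicion_x > ox then movimientos ++ [IZQUIERDA]
      else if posicion_y < oy then movimientos ++ [ARRIBA]
      else if posicion_y > oy then movimientos ++ [ABAJO]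
      else movimientos) acc
    = acc ++ pvGo ox oy robots := by
  induction robots generalizing acc with
  | nil => simp [pvGo]
  | cons r rs ih =>
    obtain ⟨x, y⟩ := r
    simp only [List.foldl_cons, ih, pvGo]
    have t1 : pvTabla.get? (-1, -1) = some (1, 1) := by decide
    have t2 : pvTabla.get? (1, -1) = some (-1, 1) := by decide
    have t3 : pvTabla.get? (-1, 1) = some (1, -1) := by decide
    have t4 : pvTabla.get? (1, 1) = some (-1, -1) := by decide
    have t5 : pvTabla.get? (-1, 0) = some (1, 0) := by decide
    have t6 : pvTabla.get? (1, 0) = some (-1, 0) := by decide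
    have t7 : pvTabla.get? (0, -1) = some (0, 1) := by decide
    have t8 : pvTabla.get? (0, 1) = some (0, -1) := by decide
    have t9 : pvTabla.get? (0, 0) = none := by decide
    rcases lt_trichotomy x ox with hx | hx | hx <;>
      rcases lt_trichotomy y oy with hy | hy | hy <;>
      simp [hx, hy, not_lt_of_gt, t1, t2, t3, t4, t5, t6, t7, t8, t9,
        ARRIBA, ABAJO, DERECHA, IZQUIERDA, ARRIBA_DERECHA, ARRIBA_IZQUIERDA,
        ABAJO_DERECHA, ABAJO_IZQUIERDA]

-- ===== VERDICT =====
theorem reconocer_movimientos_robots_spec : Claim_equal_reconocer_movimientos_robots := by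
  intro jugador robots _
  show _ = _
  simpa [reconocer_movimientos_robots_alt] using pv_foldl_suffix jugador.1 jugador.2 robots []
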